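-- pv_equiv track=rewrite | github.com/loveAlakazam/Algorithm_CEK | Algorithm_study_02/0421/프로그래머스_예산.py | solution
-- ===== SOURCE A (Python) =====
-- def solution(budgets, M):
--     budgets=sorted(budgets)
--     left=0
--     right=budgets[-1]
--
--     # 상한액이 right일때의 예산요청보다 M이 더 큰 경우
--     if M>= sum(budgets):
--         return right
--
--     while True:
--         mid= int((left+right)//2)
--         if left==mid or right==mid:
--             break
--
--         result=sum(map( lambda budget: budget if budget<mid else mid, budgets))
--         if result==M:
--             return mid
--
--         elif result<M: #left ~mid-1탐색
--             left=mid
--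
--         else:#result>M => mid+1 ~right 탐색
--             right=mid
--
--     return mid
-- ===== SOURCE B (Python) =====
-- def solution(budgets, M):
--     bs = sorted(budgets)
--     total = sum(bs)
--     if M >= total:
--         return bs[-1]
--     # One ascending scan with a running prefix sum: at the first element b where
--     # granting everyone at least b would exceed M, the optimal cap lies just below,
--     # and is obtained by one floor division (clamped at 0: caps are non-negative).
--     n = len(bs)
--     prefix = 0
--     for i, b in enumerate(bs):
--         if prefix + b * (n - i) > M:
--             cap = (M - prefix) // (n - i)
--             return cap if cap > 0 else 0
--         prefix += b
-- ===== Notes on version B (the rewrite author's own statement) =====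
-- stated objective: alternative
-- what changed: Replaces the binary search over the cap value (re-summing the whole clamped list at every probe) by a single ascending scan over the sorted list with a running prefix sum, computing the optimal cap in closed form by one floor division at the first element whose full grant would exceed M.
-- intended difference: When every budget is negative and M < sum(budgets), A's bisection of the inverted interval [0, max] always returns the artifact -1, while B returns 0, the natural non-negative cap meaning nothing can be funded. — e.g. on solution([-3], -5): A returns -1, B returns 0
import Mathlib
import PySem

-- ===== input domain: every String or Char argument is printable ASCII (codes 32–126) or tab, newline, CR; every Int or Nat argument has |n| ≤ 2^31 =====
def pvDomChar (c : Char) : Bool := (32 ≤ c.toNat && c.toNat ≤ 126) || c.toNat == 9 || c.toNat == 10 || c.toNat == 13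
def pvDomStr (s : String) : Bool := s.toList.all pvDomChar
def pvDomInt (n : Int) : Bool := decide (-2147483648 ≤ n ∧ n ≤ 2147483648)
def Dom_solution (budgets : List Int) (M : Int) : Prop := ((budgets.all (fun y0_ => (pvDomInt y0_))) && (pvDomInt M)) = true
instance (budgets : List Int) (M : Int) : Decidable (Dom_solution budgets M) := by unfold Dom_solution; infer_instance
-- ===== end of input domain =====

-- B replaces A's value-space binary search (which re-sums the clamped list at every probe) by one
-- ascending prefix-sum scan of the sorted list with a closed-form floor division;
-- on all-negative budget lists with M < sum, A returns the bisection artifact -1 while B returns the intended cap 0.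


-- ===== PORT A =====
-- sum(map(lambda budget: budget if budget<mid else mid, budgets))
def clampSum (bs : List Int) (mid : Int) : Int :=
  (bs.map (fun budget => if budget < mid then budget else mid)).sum

-- A's 'while True' loop, with a fuel argument making the recursion structural (|right-left|
-- strictly shrinks every iteration, so the fuel passed below is never exhausted; fuel-guard only)
def solutionLoop (bs : List Int) (M : Int) : Nat → Int → Int → Int
  | 0, _left, _right => 0
  | fuel + 1, left, right =>
    let mid := PySem.Int.floordiv (left + right) 2
    if left = mid ∨ right = mid then mid
    else
      let result := clampSum bs mid
      if result = M then mid
      else if result < M then solutionLoop bs M fuel mid right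
      else solutionLoop bs M fuel left mid

def solution (budgets : List Int) (M : Int) : Int :=
  let bs := PySem.List.sorted budgets (fun x => x) false
  let left : Int := 0
  let right := PySem.List.pyGetD bs (-1) 0   -- budgets[-1]; Pre_ guards the empty list
  if M ≥ bs.sum then right
  else solutionLoop bs M ((right - left).natAbs + 1) left right

-- ===== PORT B =====
-- B's 'for i, b in enumerate(bs)' scan (index i and running prefix sum as accumulators);
-- the [] case is Python's fall-through (B returns None there; unreachable when M < total)
def altScan (M : Int) (n : Int) : List Int → Int → Int → Int
  | [], _i, _pre => 0
  | b :: rest, i, pre =>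
    if pre + b * (n - i) > M then
      let cap := PySem.Int.floordiv (M - pre) (n - i)
      if cap > 0 then cap else 0
    else altScan M n rest (i + 1) (pre + b)

def solution_alt (budgets : List Int) (M : Int) : Int :=
  let bs := PySem.List.sorted budgets (fun x => x) false
  let total := bs.sum
  if M ≥ total then PySem.List.pyGetD bs (-1) 0
  else altScan M (bs.length : Int) bs 0 0

-- ===== PRECONDITION & SPEC =====
-- Pre_ excludes only the empty list, on which A raises IndexError (and B ValueError).
def Pre_solution (budgets : List Int) (M : Int) : Prop := budgets ≠ []
instance (budgets : List Int) (M : Int) : Decidable (Pre_solution budgets M) := by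
  unfold Pre_solution; infer_instance
def pvWitness_solution : List Int × Int := ([1, 2, 3], 4)

-- When every budget is negative and M < sum(budgets), A's bisection of the inverted interval
-- [0, max] returns the artifact -1, while B returns 0, the intended non-negative cap.
def D_solution (budgets : List Int) (M : Int) : Prop :=
  budgets ≠ [] ∧ (∀ b ∈ budgets, b < 0) ∧ M < budgets.sum
instance (budgets : List Int) (M : Int) : Decidable (D_solution budgets M) := by
  unfold D_solution; infer_instance

def Spec_solution (budgets : List Int) (M : Int) (out : Int) : Prop :=
  ¬ D_solution budgets M → out = solution_alt budgets M
instance (budgets : List Int) (M : Int) (out : Int) : Decidable (Spec_solution budgets M out) := by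
  unfold Spec_solution; infer_instance

def pvDiffWitness_solution : List Int × Int := ([-3], -5)
def pvDiffWitnessOut_solution : Int × Int := (-1, 0)

-- ===== CLAIM (what is proved, stated in full; the proofs are below) =====
def Claim_unchanged_solution : Prop := ∀ (budgets : List Int) (M : Int), Dom_solution budgets M → Pre_solution budgets M → Spec_solution budgets M (solution budgets M)
def Claim_changed_solution : Prop := Dom_solution (pvDiffWitness_solution.1) (pvDiffWitness_solution.2) ∧ Pre_solution (pvDiffWitness_solution.1) (pvDiffWitness_solution.2) ∧ D_solution (pvDiffWitness_solution.1) (pvDiffWitness_solution.2) ∧ solution (pvDiffWitness_solution.1) (pvDiffWitness_solution.2) = pvDiffWitnessOut_solution.1 ∧ solution_alt (pvDiffWitness_solution.1) (pvDiffWitness_solution.2) = pvDiffWitnessOut_solution.2 ∧ pvDiffWitnessOut_solution.1 ≠ pvDiffWitnessOut_solution.2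
def Claim_exact_solution : Prop := ∀ (budgets : List Int) (M : Int), Dom_solution budgets M → Pre_solution budgets M → D_solution budgets M → solution budgets M ≠ solution_alt budgets M

-- ===== LEMMAS AND PROOFS =====

theorem clampSum_mono (bs : List Int) {a b : Int} (h : a ≤ b) :
    clampSum bs a ≤ clampSum bs b := by
  induction bs with
  | nil => simp [clampSum]
  | cons x t ih =>
    simp only [clampSum, List.map_cons, List.sum_cons] at *
    have : (if x < a then x else a) ≤ (if x < b then x else b) := by split_ifs <;> omega
    omega

theorem clampSum_le_sum (bs : List Int) (a : Int) : clampSum bs a ≤ bs.sum := by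
  induction bs with
  | nil => simp [clampSum]
  | cons x t ih =>
    simp only [clampSum, List.map_cons, List.sum_cons] at *
    have : (if x < a then x else a) ≤ x := by split_ifs <;> omega
    omega

theorem clampSum_of_le (bs : List Int) {a : Int} (h : ∀ x ∈ bs, x ≤ a) :
    clampSum bs a = bs.sum := by
  induction bs with
  | nil => simp [clampSum]
  | cons x t ih =>
    simp only [clampSum, List.map_cons, List.sum_cons] at *
    have hx := h x (by simp)
    have ht := ih (fun y hy => h y (by simp [hy]))
    have : (if x < a then x else a) = x := by split_ifs <;> omega
    omega

theorem clampSum_succ_lt (bs : List Int) {a : Int} (h : clampSum bs a < bs.sum) :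
    clampSum bs a < clampSum bs (a + 1) := by
  by_cases hall : ∀ x ∈ bs, x ≤ a
  · exact absurd (clampSum_of_le bs hall) (by omega)
  · push_neg at hall
    obtain ⟨x, hx, hxa⟩ := hall
    obtain ⟨pre, post, rfl⟩ := List.append_of_mem hx
    have hpre : clampSum pre a ≤ clampSum pre (a + 1) := clampSum_mono pre (by omega)
    have hpost : clampSum post a ≤ clampSum post (a + 1) := clampSum_mono post (by omega)
    have hsplit : ∀ c : Int, clampSum (pre ++ x :: post) c
        = clampSum pre c + (if x < c then x else c) + clampSum post c := by
      intro c; simp [clampSum]; ring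
    rw [hsplit, hsplit]
    have hx1 : (if x < a then x else a) < (if x < a + 1 then x else a + 1) := by
      split_ifs <;> omega
    omega

theorem clampSum_segment (done rest : List Int) {a : Int}
    (h1 : ∀ x ∈ done, x ≤ a) (h2 : ∀ x ∈ rest, a ≤ x) :
    clampSum (done ++ rest) a = done.sum + a * rest.length := by
  have hd : clampSum done a = done.sum := clampSum_of_le done h1
  have hr : clampSum rest a = a * rest.length := by
    induction rest with
    | nil => simp [clampSum]
    | cons x t ih =>
      simp only [clampSum, List.map_cons, List.sum_cons, List.length_cons] at *
      have hx := h2 x (by simp)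
      have ht := ih (fun y hy => h2 y (by simp [hy]))
      have hxx : (if x < a then x else a) = a := by split_ifs <;> omega
      rw [hxx, ht]; push_cast; ring
  simp only [clampSum, List.map_append, List.sum_append] at *
  rw [hd, hr]

theorem le_getLast_of_pairwise {bs : List Int} (hs : bs.Pairwise (· ≤ ·)) (h : bs ≠ [])
    {x : Int} (hx : x ∈ bs) : x ≤ bs.getLast h := by
  induction bs with
  | nil => simp at hx
  | cons y t ih =>
    rcases List.eq_nil_or_concat t with rfl | _
    · simp at hx; simp [hx]
    · have ht : t ≠ [] := by rintro rfl; simp_all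
      rw [List.getLast_cons ht]
      rcases List.mem_cons.mp hx with rfl | hxt
      · exact le_trans (List.rel_of_pairwise_cons hs (List.getLast_mem ht)) le_rfl
      · exact ih (List.Pairwise.of_cons hs) ht hxt

-- the characterizing property of the answer (for M < sum); it is unique
def IsAns (bs : List Int) (M g : Int) : Prop :=
  0 ≤ g ∧ M < clampSum bs (g + 1) ∧ (clampSum bs g ≤ M ∨ g = 0)

theorem isAns_unique (bs : List Int) (M : Int) {g h : Int}
    (hg : IsAns bs M g) (hh : IsAns bs M h) : g = h := by
  obtain ⟨hg0, hg1, hg2⟩ := hg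
  obtain ⟨hh0, hh1, hh2⟩ := hh
  by_contra hne
  rcases lt_or_gt_of_ne hne with hlt | hlt
  · rcases hh2 with h2 | h2
    · exact absurd (le_trans (clampSum_mono bs (by omega : g + 1 ≤ h)) h2) (by omega)
    · omega
  · rcases hg2 with h2 | h2
    · exact absurd (le_trans (clampSum_mono bs (by omega : h + 1 ≤ g)) h2) (by omega)
    · omega

-- A's loop converges to the unique answer (well-behaved regime: 0 ≤ l ≤ r)
theorem loop_eq_of_isAns (bs : List Int) (M g : Int) (hg : IsAns bs M g) :
    ∀ (fuel : Nat) (l r : Int), (r - l).natAbs < fuel → 0 ≤ l → l ≤ r →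
    (clampSum bs l ≤ M ∨ l = 0) → M < clampSum bs r → solutionLoop bs M fuel l r = g := by
  intro fuel
  induction fuel with
  | zero => intro l r hn; omega
  | succ n ih =>
    intro l r hn h0 hlr hl hr
    rw [solutionLoop]
    have hmb : (2:Int) * PySem.Int.floordiv (l + r) 2 ≤ l + r ∧
        l + r < 2 * PySem.Int.floordiv (l + r) 2 + 2 := by
      rw [PySem.Int.floordiv_eq_ediv_of_pos (by omega)]; omega
    set md := PySem.Int.floordiv (l + r) 2 with hmd
    dsimp only
    split_ifs with h1 h2 h3
    · -- break: md = l or md = r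
      rcases eq_or_lt_of_le hlr with rfl | hltr
      · have hmdl : md = l := by omega
        have hl0 : l = 0 := by
          rcases hl with h | h
          · exact absurd hr (by omega)
          · exact h
        have : IsAns bs M 0 :=
          ⟨le_refl 0, lt_of_lt_of_le (hl0 ▸ hr) (clampSum_mono bs (by omega)), Or.inr rfl⟩
        rw [hmdl, hl0]; exact (isAns_unique bs M this hg)
      · -- l < r forces md = l and r = l + 1
        have hmdl : md = l := by rcases h1 with h | h; omega; omega
        have hr1 : r = l + 1 := by omega
        have : IsAns bs M l :=
          ⟨h0, hr1 ▸ hr, by rcases hl with h | h; exact Or.inl h; exact Or.inr h⟩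
        rw [hmdl]; exact isAns_unique bs M this hg
    · -- result = M
      have hlm : l < md ∧ md < r := by simp only [not_or] at h1; omega
      have : IsAns bs M md := by
        refine ⟨by omega, ?_, Or.inl (le_of_eq h2)⟩
        have hlt : clampSum bs md < bs.sum :=
          lt_of_lt_of_le (h2 ▸ hr) (clampSum_le_sum bs r)
        have := clampSum_succ_lt bs hlt
        omega
      exact isAns_unique bs M this hg
    · -- result < M : recurse on (md, r)
      have hlm : l < md ∧ md < r := by simp only [not_or] at h1; omega
      exact ih md r (by omega) (by omega) (by omega) (Or.inl (by omega)) hr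
    · -- result > M : recurse on (l, md)
      have hlm : l < md ∧ md < r := by simp only [not_or] at h1; omega
      exact ih l md (by omega) h0 (by omega) hl (by omega)

-- inverted regime (all elements below the left endpoint 0): the loop drifts to -1
theorem loop_neg (bs : List Int) (M : Int) (hM : M < bs.sum) :
    ∀ (fuel : Nat) (r : Int), r.natAbs < fuel → (∀ x ∈ bs, x ≤ r) → r < 0 →
    solutionLoop bs M fuel 0 r = -1 := by
  intro fuel
  induction fuel with
  | zero => intro r hn; omega
  | succ n ih =>
    intro r hn hub hr
    rw [solutionLoop]
    have hmb : (2:Int) * PySem.Int.floordiv (0 + r) 2 ≤ 0 + r ∧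
        0 + r < 2 * PySem.Int.floordiv (0 + r) 2 + 2 := by
      rw [PySem.Int.floordiv_eq_ediv_of_pos (by omega)]; omega
    set md := PySem.Int.floordiv (0 + r) 2 with hmd
    dsimp only
    rcases eq_or_lt_of_le (by omega : r ≤ -1) with rfl | hr2
    · have : md = -1 := by omega
      rw [if_pos (Or.inr this.symm), this]
    · -- r ≤ -2 : md strictly between r and 0
      have hbet : r < md ∧ md ≤ -1 := by omega
      rw [if_neg (by omega)]
      have hres : clampSum bs md = bs.sum :=
        clampSum_of_le bs (fun x hx => by have := hub x hx; omega)
      rw [if_neg (by omega), if_neg (by omega)]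
      exact ih md (by omega) (fun x hx => by have := hub x hx; omega) (by omega)

-- B's scan computes a value with the characterizing property (sorted input, M < sum)
theorem altScan_spec (bs : List Int) (M : Int) (hs : bs.Pairwise (· ≤ ·)) (hM : M < bs.sum) :
    ∀ (rest done : List Int), bs = done ++ rest →
    (∀ x ∈ done, done.sum + x * (rest.length : Int) ≤ M) →
    IsAns bs M (altScan M (bs.length : Int) rest (done.length : Int) done.sum) := by
  intro rest
  induction rest with
  | nil =>
    intro done hbs hinv
    rcases done.eq_nil_or_concat with rfl | ⟨d', x, rfl⟩
    · simp only [List.nil_append] at hbs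
      subst hbs
      refine ⟨le_refl 0, ?_, Or.inr rfl⟩
      simp only [List.sum_nil] at hM
      simp [clampSum]; omega
    · exfalso
      have h1 := hinv x (by simp)
      rw [hbs] at hM
      simp only [List.length_nil, Nat.cast_zero, mul_zero, add_zero, List.append_nil] at h1 hM
      omega
  | cons b rest' ih =>
    intro done hbs hinv
    have hk : ((rest'.length : Int) + 1) > 0 := by positivity
    have hlen : (bs.length : Int) - done.length = (rest'.length : Int) + 1 := by
      rw [hbs]; push_cast [List.length_append, List.length_cons]; omega
    have hsplit := (List.pairwise_append.mp (hbs ▸ hs))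
    have hdone_le : ∀ x ∈ done, x ≤ b := fun x hx => hsplit.2.2 x hx b (by simp)
    have hrest_ge : ∀ x ∈ b :: rest', b ≤ x := by
      intro x hx
      rcases List.mem_cons.mp hx with rfl | hx'
      · exact le_refl x
      · exact List.rel_of_pairwise_cons hsplit.2.1 hx'
    rw [altScan]
    rw [hlen]
    split_ifs with htrig
    · -- triggered: the cap lies in this segment, one floor division
      set k1 : Int := (rest'.length : Int) + 1 with hk1
      set cap := PySem.Int.floordiv (M - done.sum) k1 with hcap
      have hcap_le : cap * k1 ≤ M - done.sum := by
        rw [hcap]; exact (PySem.Int.le_floordiv_iff_mul_le hk).mp (le_refl _)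
      have hcap_gt : M - done.sum < (cap + 1) * k1 := by
        rw [hcap]; exact (PySem.Int.floordiv_lt_iff_lt_mul hk).mp (by omega)
      have hcap_lt_b : cap < b := by nlinarith
      have hdone_le_cap : ∀ x ∈ done, x ≤ cap := by
        intro x hx
        have h' : done.sum + x * ((rest'.length : Int) + 1) ≤ M := by
          have := hinv x hx; simpa using this
        rw [hcap, hk1]
        refine (PySem.Int.le_floordiv_iff_mul_le (by positivity)).mpr ?_
        rw [hk1] at hcap_le hcap_gt
        omega
      have hseg : ∀ a : Int, (∀ x ∈ done, x ≤ a) → a ≤ b →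
          clampSum bs a = done.sum + a * k1 := by
        intro a h1 h2
        rw [hbs, clampSum_segment done (b :: rest') h1
          (fun x hx => le_trans h2 (hrest_ge x hx))]
        rw [hk1]; simp only [List.length_cons]; push_cast; ring
      have hfc1 : clampSum bs (cap + 1) = done.sum + (cap + 1) * k1 :=
        hseg (cap + 1) (fun x hx => by have := hdone_le_cap x hx; omega) (by omega)
      change IsAns bs M (if cap > 0 then cap else 0)
      split_ifs with hpos
      · refine ⟨by omega, by rw [hfc1]; omega, Or.inl ?_⟩
        rw [hseg cap hdone_le_cap (by omega)]; omega
      · refine ⟨le_refl 0, ?_, Or.inr rfl⟩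
        have : clampSum bs (cap + 1) ≤ clampSum bs (0 + 1) := clampSum_mono bs (by omega)
        rw [hfc1] at this; omega
    · -- not triggered: recurse with b moved into the prefix
      have heq : (done.length : Int) + 1 = ((done ++ [b]).length : Int) := by simp
      have hsum : done.sum + b = (done ++ [b]).sum := by simp
      rw [heq, hsum]
      apply ih (done ++ [b]) (by simp [hbs])
      intro x hx
      simp only [List.sum_append, List.sum_cons, List.sum_nil, add_zero]
      have htr : done.sum + b * ((rest'.length : Int) + 1) ≤ M := by
        have h' : ¬ (done.sum + b * ((rest'.length : Int) + 1) > M) := by simpa using htrig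
        omega
      have hexp : b * ((rest'.length : Int) + 1) = b * (rest'.length : Int) + b := by ring
      rcases List.mem_append.mp hx with hx' | hx'
      · have h1 := hdone_le x hx'
        have hk0 : (0 : Int) ≤ (rest'.length : Int) := by positivity
        have h3 : x * (rest'.length : Int) ≤ b * (rest'.length : Int) :=
          mul_le_mul_of_nonneg_right h1 hk0
        omega
      · rw [List.mem_singleton.mp hx']
        omega

-- ===== VERDICT (by name: the statement is the Claim_ definition above) =====
theorem solution_spec : Claim_unchanged_solution := by
  unfold Claim_unchanged_solution
  intro budgets M hdom hpre
  unfold Spec_solution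
  intro hnD
  unfold solution solution_alt
  dsimp only
  set bs := PySem.List.sorted budgets (fun x => x) false with hbsdef
  have hperm : bs.Perm budgets := PySem.List.sorted_perm budgets (fun x => x) false
  have hsum : bs.sum = budgets.sum := hperm.sum_eq
  have hne : bs ≠ [] := by
    intro h
    apply hpre
    have := hperm.length_eq
    rw [h] at this
    exact List.eq_nil_of_length_eq_zero this.symm
  by_cases hM : M ≥ bs.sum
  · rw [if_pos hM, if_pos hM]
  · rw [if_neg hM, if_neg hM]
    have hMlt : M < bs.sum := by omega
    have hpair : bs.Pairwise (· ≤ ·) := PySem.List.sorted_pairwise budgets (fun x => x)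
    have hlast : PySem.List.pyGetD bs (-1) 0 = bs.getLast hne :=
      PySem.List.pyGetD_neg_one (xs := bs) 0 hne
    have hub : ∀ x ∈ bs, x ≤ bs.getLast hne :=
      fun x hx => le_getLast_of_pairwise hpair hne hx
    -- ¬D_ gives a non-negative budget, so the last (max) element is ≥ 0
    have hmx0 : 0 ≤ bs.getLast hne := by
      unfold D_solution at hnD
      push_neg at hnD
      have hex : ∃ x ∈ budgets, 0 ≤ x := by
        by_contra hno
        push_neg at hno
        have := hnD hpre (fun b hb => hno b hb)
        omega
      obtain ⟨x, hxmem, hx0⟩ := hex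
      exact le_trans hx0 (hub x (hperm.mem_iff.mpr hxmem))
    have hg := altScan_spec bs M hpair hMlt bs [] (by simp) (by simp)
    simp only [List.length_nil, Nat.cast_zero, List.sum_nil] at hg
    rw [hlast]
    exact loop_eq_of_isAns bs M _ hg ((bs.getLast hne - 0).natAbs + 1) 0 (bs.getLast hne)
      (by omega) le_rfl hmx0 (Or.inr rfl) (by rw [clampSum_of_le bs hub]; exact hMlt)

theorem solution_changed : Claim_changed_solution := by
  unfold Claim_changed_solution
  decide

theorem solution_tight : Claim_exact_solution := by
  unfold Claim_exact_solution
  intro budgets M hdom hpre hD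
  obtain ⟨-, hneg, hMs⟩ := hD
  unfold solution solution_alt
  dsimp only
  set bs := PySem.List.sorted budgets (fun x => x) false with hbsdef
  have hperm : bs.Perm budgets := PySem.List.sorted_perm budgets (fun x => x) false
  have hsum : bs.sum = budgets.sum := hperm.sum_eq
  have hne : bs ≠ [] := by
    intro h
    apply hpre
    have := hperm.length_eq
    rw [h] at this
    exact List.eq_nil_of_length_eq_zero this.symm
  have hMlt : M < bs.sum := by omega
  rw [if_neg (by omega), if_neg (by omega)]
  have hpair : bs.Pairwise (· ≤ ·) := PySem.List.sorted_pairwise budgets (fun x => x)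
  have hnegbs : ∀ x ∈ bs, x < 0 := fun x hx => hneg x (hperm.mem_iff.mp hx)
  have hlast : PySem.List.pyGetD bs (-1) 0 = bs.getLast hne :=
    PySem.List.pyGetD_neg_one (xs := bs) 0 hne
  have hub : ∀ x ∈ bs, x ≤ bs.getLast hne :=
    fun x hx => le_getLast_of_pairwise hpair hne hx
  have hA : solutionLoop bs M ((PySem.List.pyGetD bs (-1) 0 - 0).natAbs + 1) 0
      (PySem.List.pyGetD bs (-1) 0) = -1 := by
    rw [hlast]
    exact loop_neg bs M hMlt ((bs.getLast hne - 0).natAbs + 1) (bs.getLast hne) (by omega) hub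
      (hnegbs _ (List.getLast_mem hne))
  rw [hA]
  have hg := altScan_spec bs M hpair hMlt bs [] (by simp) (by simp)
  simp only [List.length_nil, Nat.cast_zero, List.sum_nil] at hg
  have h0 := hg.1
  omega
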